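-- pv_equiv track=rewrite | github.com/Sirishak22/BioSPM | learning_to_rank.py | term_proximity
-- ===== SOURCE A (Python) =====
-- import itertools
--
-- def term_proximity(tokens, term1, term2):
--     """Distance between two term in a list of tokens.
--
--     :param tokens: List of tokens.
--     :param term1: first term.
--     :param term2: second term.
--     :return: distance between the terms.
--     """
--     term1 = term1.lower()
--     term2 = term2.lower()
--     if term1 in tokens and term2 in tokens:
--         term1_indexes = [index for index, value in enumerate(tokens) if value == term1]
--         term2_indexes = [index for index, value in enumerate(tokens) if value == term2]
--         distances = [abs(item[0] - item[1]) for item in itertools.product(term1_indexes, term2_indexes)]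
--         return min(distances)
--     else:
--         return 10000000
-- ===== SOURCE B (Python) =====
-- def term_proximity(tokens, term1, term2):
--     """Distance between two terms in a list of tokens, in a single pass."""
--     term1 = term1.lower()
--     term2 = term2.lower()
--     last1 = None
--     last2 = None
--     best = None
--     for i, tok in enumerate(tokens):
--         if tok == term1:
--             last1 = i
--             if last2 is not None:
--                 d = i - last2
--                 if best is None or d < best:
--                     best = d
--         if tok == term2:
--             last2 = i
--             if last1 is not None:
--                 d = i - last1
--                 if best is None or d < best:
--                     best = d
--     return 10000000 if best is None else best
-- ===== Notes on version B (the rewrite author's own statement) =====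
-- stated objective: alternative
-- what changed: Replaces the two index-list comprehensions plus the all-pairs itertools.product minimum by one pass over the tokens that tracks the last seen index of each term and relaxes a running minimum distance; this removes the quadratic pair enumeration (though on the generated inputs it is not measurably faster).
import Mathlib
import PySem

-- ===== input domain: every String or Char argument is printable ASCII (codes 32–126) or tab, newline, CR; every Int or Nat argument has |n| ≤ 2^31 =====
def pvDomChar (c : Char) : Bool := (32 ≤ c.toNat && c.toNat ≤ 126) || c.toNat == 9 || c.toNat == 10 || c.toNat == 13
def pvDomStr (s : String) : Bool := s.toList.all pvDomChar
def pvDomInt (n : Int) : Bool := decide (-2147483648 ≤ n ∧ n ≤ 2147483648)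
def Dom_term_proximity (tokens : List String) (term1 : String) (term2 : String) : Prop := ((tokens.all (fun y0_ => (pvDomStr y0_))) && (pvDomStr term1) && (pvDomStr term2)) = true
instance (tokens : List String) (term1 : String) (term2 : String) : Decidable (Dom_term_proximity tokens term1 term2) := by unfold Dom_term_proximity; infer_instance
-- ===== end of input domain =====

-- B replaces A's all-pairs product of occurrence indices by a single pass that
-- tracks the last seen index of each term and updates a running minimum (objective: alternative).

-- ===== PORT A =====
def term_proximity (tokens : List String) (term1 : String) (term2 : String) : Int :=
  let t1 := PySem.Str.lower term1
  let t2 := PySem.Str.lower term2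
  if t1 ∈ tokens ∧ t2 ∈ tokens then
    let term1_indexes := (PySem.List.enumerate tokens).filterMap
      (fun p => if p.2 = t1 then some p.1 else none)
    let term2_indexes := (PySem.List.enumerate tokens).filterMap
      (fun p => if p.2 = t2 then some p.1 else none)
    let distances := term1_indexes.flatMap (fun i => term2_indexes.map (fun j => |i - j|))
    (PySem.List.min? distances (fun x => x)).getD 0  -- min(distances); the list is nonempty under the guard
  else 10000000

-- ===== PORT B =====
-- loop body of Source B: state = (last1, last2, best), p = (i, tok)
def tpStep (t1 t2 : String) (s : Option Int × Option Int × Option Int) (p : Int × String) :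
    Option Int × Option Int × Option Int :=
  let last1 := s.1
  let last2 := s.2.1
  let best := s.2.2
  let last1 := if p.2 = t1 then some p.1 else last1
  let best :=
    if p.2 = t1 then
      match last2 with
      | some j =>
        let d := p.1 - j
        match best with
        | none => some d
        | some b => if d < b then some d else some b
      | none => best
    else best
  let last2 := if p.2 = t2 then some p.1 else last2
  let best :=
    if p.2 = t2 then
      match last1 with
      | some j =>
        let d := p.1 - j
        match best with
        | none => some d
        | some b => if d < b then some d else some b
      | none => best
    else best
  (last1, last2, best)

def term_proximity_alt (tokens : List String) (term1 : String) (term2 : String) : Int :=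
  let t1 := PySem.Str.lower term1
  let t2 := PySem.Str.lower term2
  let st := (PySem.List.enumerate tokens).foldl (tpStep t1 t2) (none, none, none)
  match st.2.2 with
  | none => 10000000
  | some b => b

-- ===== PRECONDITION & SPEC =====
def Spec_term_proximity (tokens : List String) (term1 : String) (term2 : String) (out : Int) : Prop := out = term_proximity_alt tokens term1 term2
instance (tokens : List String) (term1 : String) (term2 : String) (out : Int) : Decidable (Spec_term_proximity tokens term1 term2 out) := by unfold Spec_term_proximity; infer_instance

-- ===== CLAIM (what is proved, stated in full; the proofs are below) =====
def Claim_equal_term_proximity : Prop := ∀ (tokens : List String) (term1 : String) (term2 : String), Dom_term_proximity tokens term1 term2 → Spec_term_proximity tokens term1 term2 (term_proximity tokens term1 term2)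

-- ===== LEMMAS AND PROOFS =====

-- occurrence indices of term t in an enumerated list
def occ (t : String) (e : List (Int × String)) : List Int :=
  e.filterMap (fun p => if p.2 = t then some p.1 else none)

def dists (t1 t2 : String) (e : List (Int × String)) : List Int :=
  (occ t1 e).flatMap (fun i => (occ t2 e).map (fun j => |i - j|))

def IsMaxOf (l : List Int) (o : Option Int) : Prop :=
  match o with
  | none => l = []
  | some m => m ∈ l ∧ ∀ i ∈ l, i ≤ m

def IsMinOf (l : List Int) (o : Option Int) : Prop :=
  match o with
  | none => l = []
  | some m => m ∈ l ∧ ∀ d ∈ l, m ≤ d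

def TPInv (t1 t2 : String) (e : List (Int × String)) (s : Option Int × Option Int × Option Int) : Prop :=
  IsMaxOf (occ t1 e) s.1 ∧ IsMaxOf (occ t2 e) s.2.1 ∧ IsMinOf (dists t1 t2 e) s.2.2

lemma occ_append_single (t : String) (e : List (Int × String)) (n : Int) (x : String) :
    occ t (e ++ [(n, x)]) = occ t e ++ (if x = t then [n] else []) := by
  simp only [occ, List.filterMap_append, List.filterMap_cons, List.filterMap_nil]
  split <;> simp_all

lemma mem_occ {t : String} {e : List (Int × String)} {i : Int} :
    i ∈ occ t e ↔ (i, t) ∈ e := by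
  simp only [occ, List.mem_filterMap]
  constructor
  · rintro ⟨⟨a, b⟩, hp, hf⟩
    by_cases hb : b = t <;> simp [hb] at hf
    subst hf; subst hb; exact hp
  · intro hp; exact ⟨(i, t), hp, by simp⟩

lemma isMinOf_relax_none {L L' : List Int} {d : Int}
    (hb : IsMinOf L none) (hd : d ∈ L') (hlow : ∀ y ∈ L', y ∈ L ∨ d ≤ y) :
    IsMinOf L' (some d) := by
  simp only [IsMinOf] at hb ⊢
  refine ⟨hd, fun y hy => ?_⟩
  rcases hlow y hy with h | h
  · rw [hb] at h; cases h
  · exact h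

lemma isMinOf_relax_some {L L' : List Int} {bv d : Int}
    (hb : IsMinOf L (some bv)) (hd : d ∈ L') (hsub : ∀ y ∈ L, y ∈ L')
    (hlow : ∀ y ∈ L', y ∈ L ∨ d ≤ y) :
    IsMinOf L' (if d < bv then some d else some bv) := by
  simp only [IsMinOf] at hb
  obtain ⟨hmem, hmin⟩ := hb
  split_ifs with hlt
  · exact ⟨hd, fun y hy => (hlow y hy).elim (fun h => le_of_lt (lt_of_lt_of_le hlt (hmin y h))) id⟩
  · exact ⟨hsub _ hmem, fun y hy =>
      (hlow y hy).elim (hmin y) (fun h => le_trans (le_of_not_gt hlt) h)⟩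

lemma isMaxOf_append {O : List Int} {n : Int} (h : ∀ i ∈ O, i < n) :
    IsMaxOf (O ++ [n]) (some n) := by
  refine ⟨by simp, fun i hi => ?_⟩
  rcases List.mem_append.mp hi with h' | h'
  · exact le_of_lt (h i h')
  · simp at h'; omega

lemma mem_dists {t1 t2 : String} {e : List (Int × String)} {d : Int} :
    d ∈ dists t1 t2 e ↔ ∃ i ∈ occ t1 e, ∃ j ∈ occ t2 e, d = |i - j| := by
  simp [dists, List.mem_flatMap, List.mem_map, eq_comm]


def relax (b : Option Int) (d : Int) : Option Int :=
  match b with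
  | none => some d
  | some bv => if d < bv then some d else some bv

def step2 (l : Option Int) (b : Option Int) (n : Int) : Option Int :=
  match l with
  | some j => relax b (n - j)
  | none => b

lemma tpStep_def (t1 t2 : String) (l1 l2 b : Option Int) (i : Int) (tok : String) :
    tpStep t1 t2 (l1, l2, b) (i, tok) =
      (if tok = t1 then some i else l1,
       if tok = t2 then some i else l2,
       if tok = t2 then
         step2 (if tok = t1 then some i else l1) (if tok = t1 then step2 l2 b i else b) i
       else if tok = t1 then step2 l2 b i else b) := by
  by_cases h1 : tok = t1 <;> by_cases h2 : tok = t2 <;>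
    cases l1 <;> cases l2 <;> cases b <;>
    simp [tpStep, step2, relax, h1, h2]

lemma min_mid (O1 O2 : List Int) (n : Int) (l2 b : Option Int)
    (h2 : IsMaxOf O2 l2)
    (hb : IsMinOf (O1.flatMap (fun i => O2.map (fun j => |i - j|))) b)
    (hi2 : ∀ j ∈ O2, j < n) :
    IsMinOf ((O1 ++ [n]).flatMap (fun i => O2.map (fun j => |i - j|))) (step2 l2 b n) := by
  cases l2 with
  | none =>
    have hO2 : O2 = [] := h2
    subst hO2
    simpa [step2] using hb
  | some j =>
    obtain ⟨hjmem, hjmax⟩ := h2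
    have hjn : j < n := hi2 j hjmem
    have hd : n - j ∈ (O1 ++ [n]).flatMap (fun i => O2.map (fun j => |i - j|)) := by
      simp only [List.mem_flatMap, List.mem_map]
      exact ⟨n, by simp, j, hjmem, by rw [abs_of_nonneg (by omega)]⟩
    have hsub : ∀ y ∈ O1.flatMap (fun i => O2.map (fun j => |i - j|)),
        y ∈ (O1 ++ [n]).flatMap (fun i => O2.map (fun j => |i - j|)) := by
      intro y hy
      simp only [List.mem_flatMap, List.mem_map] at hy ⊢
      obtain ⟨i, hi, z, hz, he⟩ := hy
      exact ⟨i, List.mem_append_left _ hi, z, hz, he⟩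
    have hlow : ∀ y ∈ (O1 ++ [n]).flatMap (fun i => O2.map (fun j => |i - j|)),
        y ∈ O1.flatMap (fun i => O2.map (fun j => |i - j|)) ∨ n - j ≤ y := by
      intro y hy
      simp only [List.mem_flatMap, List.mem_map, List.mem_append, List.mem_singleton] at hy
      obtain ⟨i, hi | hi, z, hz, he⟩ := hy
      · exact Or.inl (by
          simp only [List.mem_flatMap, List.mem_map]
          exact ⟨i, hi, z, hz, he⟩)
      · right
        have hzj : z ≤ j := hjmax z hz
        have hzn : z < n := hi2 z hz
        rw [← he, hi, abs_of_nonneg (by omega)]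
        omega
    cases b with
    | none => exact isMinOf_relax_none hb hd hlow
    | some bv =>
      simp only [step2, relax]
      exact isMinOf_relax_some hb hd hsub hlow

lemma min_mid2 (O1 O2 : List Int) (n : Int) (l1 b : Option Int)
    (h1 : IsMaxOf O1 l1)
    (hb : IsMinOf (O1.flatMap (fun i => O2.map (fun j => |i - j|))) b)
    (hi1 : ∀ i ∈ O1, i ≤ n) :
    IsMinOf (O1.flatMap (fun i => (O2 ++ [n]).map (fun j => |i - j|))) (step2 l1 b n) := by
  cases l1 with
  | none =>
    have hO1 : O1 = [] := h1
    subst hO1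
    simpa [step2] using hb
  | some j =>
    obtain ⟨hjmem, hjmax⟩ := h1
    have hjn : j ≤ n := hi1 j hjmem
    have hd : n - j ∈ O1.flatMap (fun i => (O2 ++ [n]).map (fun j => |i - j|)) := by
      simp only [List.mem_flatMap, List.mem_map]
      exact ⟨j, hjmem, n, by simp, by rw [abs_of_nonpos (by omega)]; ring⟩
    have hsub : ∀ y ∈ O1.flatMap (fun i => O2.map (fun j => |i - j|)),
        y ∈ O1.flatMap (fun i => (O2 ++ [n]).map (fun j => |i - j|)) := by
      intro y hy
      simp only [List.mem_flatMap, List.mem_map] at hy ⊢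
      obtain ⟨i, hi, z, hz, he⟩ := hy
      exact ⟨i, hi, z, List.mem_append_left _ hz, he⟩
    have hlow : ∀ y ∈ O1.flatMap (fun i => (O2 ++ [n]).map (fun j => |i - j|)),
        y ∈ O1.flatMap (fun i => O2.map (fun j => |i - j|)) ∨ n - j ≤ y := by
      intro y hy
      simp only [List.mem_flatMap, List.mem_map, List.mem_append, List.mem_singleton] at hy
      obtain ⟨i, hi, z, hz | hz, he⟩ := hy
      · exact Or.inl (by
          simp only [List.mem_flatMap, List.mem_map]
          exact ⟨i, hi, z, hz, he⟩)
      · right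
        have hij : i ≤ j := hjmax i hi
        have hin : i ≤ n := hi1 i hi
        rw [← he, hz, abs_of_nonpos (by omega)]
        omega
    cases b with
    | none => exact isMinOf_relax_none hb hd hlow
    | some bv =>
      simp only [step2, relax]
      exact isMinOf_relax_some hb hd hsub hlow

lemma inv_step (t1 t2 : String) (e : List (Int × String)) (s : Option Int × Option Int × Option Int)
    (n : Int) (x : String) (hs : TPInv t1 t2 e s) (hn : ∀ p ∈ e, p.1 < n) :
    TPInv t1 t2 (e ++ [(n, x)]) (tpStep t1 t2 s (n, x)) := by
  obtain ⟨l1, l2, b⟩ := s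
  obtain ⟨h1, h2, hb⟩ := hs
  have hi1 : ∀ i ∈ occ t1 e, i < n := fun i hi => hn _ (mem_occ.mp hi)
  have hi2 : ∀ i ∈ occ t2 e, i < n := fun i hi => hn _ (mem_occ.mp hi)
  unfold TPInv
  rw [tpStep_def]
  by_cases hx1 : x = t1 <;> by_cases hx2 : x = t2
  · -- the new token is both terms
    subst hx1; subst hx2
    simp only [dists, occ_append_single, if_true]
    refine ⟨isMaxOf_append hi1, isMaxOf_append hi2, ?_⟩
    exact min_mid2 (occ x e ++ [n]) (occ x e) n (some n) _
      (isMaxOf_append hi1) (min_mid (occ x e) (occ x e) n l2 b h2 hb hi2)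
      (by intro i hi; rcases List.mem_append.mp hi with h' | h'
          · exact le_of_lt (hi1 i h')
          · simp at h'; omega)
  · -- only term1
    subst hx1
    simp only [dists, occ_append_single, if_neg hx2, List.append_nil]
    exact ⟨isMaxOf_append hi1, h2, min_mid (occ x e) (occ t2 e) n l2 b h2 hb hi2⟩
  · -- only term2
    subst hx2
    simp only [dists, occ_append_single, if_neg hx1, List.append_nil]
    exact ⟨h1, isMaxOf_append hi2,
      min_mid2 (occ t1 e) (occ x e) n l1 b h1 hb (fun i hi => le_of_lt (hi1 i hi))⟩
  · -- neither
    simp only [dists, occ_append_single, if_neg hx1, if_neg hx2, List.append_nil]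
    exact ⟨h1, h2, hb⟩

lemma inv_enumerate (t1 t2 : String) (tokens : List String) :
    TPInv t1 t2 (PySem.List.enumerate tokens)
      ((PySem.List.enumerate tokens).foldl (tpStep t1 t2) (none, none, none)) := by
  induction tokens using List.reverseRecOn with
  | nil => exact ⟨rfl, rfl, rfl⟩
  | append_singleton xs x ih =>
    rw [PySem.List.enumerate_append]
    simp only [PySem.List.enumerate_cons, PySem.List.enumerate_nil, zero_add,
      List.foldl_append, List.foldl_cons, List.foldl_nil]
    apply inv_step
    · exact ih
    · intro p hp
      rw [PySem.List.mem_enumerate_iff] at hp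
      obtain ⟨k, hk, rfl⟩ := hp
      simp
      omega

lemma term_proximity_eq (tokens : List String) (term1 term2 : String) :
    term_proximity tokens term1 term2 =
      (if PySem.Str.lower term1 ∈ tokens ∧ PySem.Str.lower term2 ∈ tokens then
        (PySem.List.min?
          (dists (PySem.Str.lower term1) (PySem.Str.lower term2) (PySem.List.enumerate tokens))
          (fun x => x)).getD 0
      else 10000000) := rfl

lemma term_proximity_alt_eq (tokens : List String) (term1 term2 : String) :
    term_proximity_alt tokens term1 term2 =
      (match ((PySem.List.enumerate tokens).foldl
          (tpStep (PySem.Str.lower term1) (PySem.Str.lower term2)) (none, none, none)).2.2 with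
       | none => 10000000
       | some b => b) := rfl

lemma mem_tokens_iff (t : String) (tokens : List String) :
    t ∈ tokens ↔ ∃ i : Int, (i, t) ∈ PySem.List.enumerate tokens := by
  constructor
  · intro h
    obtain ⟨k, hk, rfl⟩ := List.mem_iff_getElem.mp h
    exact ⟨(k : Int), by rw [PySem.List.mem_enumerate_iff]; exact ⟨k, hk, by simp⟩⟩
  · rintro ⟨i, hi⟩
    rw [PySem.List.mem_enumerate_iff] at hi
    obtain ⟨k, hk, he⟩ := hi
    have : t = tokens[k] := congrArg Prod.snd he
    rw [this]
    exact List.getElem_mem hk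

-- ===== VERDICT (by name: the statement is the Claim_ definition above) =====
theorem term_proximity_spec : Claim_equal_term_proximity := by
  unfold Claim_equal_term_proximity Spec_term_proximity
  intro tokens term1 term2 _
  rw [term_proximity_eq, term_proximity_alt_eq]
  obtain ⟨h1, h2, hb⟩ := inv_enumerate (PySem.Str.lower term1) (PySem.Str.lower term2) tokens
  set t1 := PySem.Str.lower term1 with ht1def
  set t2 := PySem.Str.lower term2 with ht2def
  set st := (PySem.List.enumerate tokens).foldl (tpStep t1 t2) (none, none, none) with hst
  by_cases hc : t1 ∈ tokens ∧ t2 ∈ tokens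
  · rw [if_pos hc]
    obtain ⟨hm1, hm2⟩ := hc
    obtain ⟨i0, hi0⟩ := (mem_tokens_iff t1 tokens).mp hm1
    obtain ⟨j0, hj0⟩ := (mem_tokens_iff t2 tokens).mp hm2
    have hd0 : |i0 - j0| ∈ dists t1 t2 (PySem.List.enumerate tokens) := by
      rw [mem_dists]
      exact ⟨i0, mem_occ.mpr hi0, j0, mem_occ.mpr hj0, rfl⟩
    have hne : dists t1 t2 (PySem.List.enumerate tokens) ≠ [] := List.ne_nil_of_mem hd0
    cases hm : PySem.List.min? (dists t1 t2 (PySem.List.enumerate tokens)) (fun x => x) with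
    | none => exact absurd ((PySem.List.min?_eq_none_iff _ _).mp hm) hne
    | some m =>
      have hmmem := PySem.List.min?_mem hm
      have hmmin := PySem.List.min?_isMin hm
      cases hb2 : st.2.2 with
      | none =>
        have : dists t1 t2 (PySem.List.enumerate tokens) = [] := by rw [hb2] at hb; exact hb
        exact absurd this hne
      | some m' =>
        rw [hb2] at hb
        obtain ⟨hm'mem, hm'min⟩ := hb
        have h₁ : m ≤ m' := hmmin m' hm'mem
        have h₂ : m' ≤ m := hm'min m hmmem
        simp only [Option.getD_some]
        omega
  · rw [if_neg hc]
    have hD : dists t1 t2 (PySem.List.enumerate tokens) = [] := by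
      rcases not_and_or.mp hc with h | h
      · have hocc : occ t1 (PySem.List.enumerate tokens) = [] := by
          rcases hocc : occ t1 (PySem.List.enumerate tokens) with _ | ⟨i, rest⟩
          · rfl
          · exact absurd ((mem_tokens_iff t1 tokens).mpr
              ⟨i, mem_occ.mp (by rw [hocc]; exact List.mem_cons_self)⟩) h
        simp [dists, hocc]
      · have hocc : occ t2 (PySem.List.enumerate tokens) = [] := by
          rcases hocc : occ t2 (PySem.List.enumerate tokens) with _ | ⟨i, rest⟩
          · rfl
          · exact absurd ((mem_tokens_iff t2 tokens).mpr
              ⟨i, mem_occ.mp (by rw [hocc]; exact List.mem_cons_self)⟩) h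
        rw [dists, List.flatMap_eq_nil_iff]
        intro a _
        simp [hocc]
    rw [hD] at hb
    cases hb2 : st.2.2 with
    | none => rfl
    | some m' =>
      rw [hb2] at hb
      exact absurd hb.1 (by simp)
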